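-- pv_equiv track=rewrite | github.com/Croyyin/A-Low-power-Hardware-Architecture-for-Real-time-CNN-Computing | new_assistant/pb_balance.py | base_opt_bdw_cpt
-- ===== SOURCE A (Python) =====
-- def base_opt_bdw_cpt(mini_in_channel, kernel_size, pooling_kernel_size, mini_fc_len):
--     top = 0
--     for i in range(len(mini_in_channel)):
--         top += mini_in_channel[i] * kernel_size[i][0] * kernel_size[i][1] * 2 + 1
--     for i in range(len(mini_fc_len)):
--         top += mini_fc_len[i] * 2 + 1
--
--     bandwith = 0
--     for i in range(len(mini_in_channel)):
--         bandwith += mini_in_channel[i] * kernel_size[i][0] * kernel_size[i][1]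
--     for i in range(len(pooling_kernel_size)):
--         bandwith += pooling_kernel_size[i][0] * pooling_kernel_size[i][1] - 1
--     for i in range(len(mini_fc_len)):
--         bandwith += mini_fc_len[i]
--     return top, bandwith
-- ===== SOURCE B (Python) =====
-- def base_opt_bdw_cpt(mini_in_channel, kernel_size, pooling_kernel_size, mini_fc_len):
--     def dcsum(lo, hi, term):
--         # divide-and-conquer reduction over the index range [lo, hi)
--         if hi - lo == 0:
--             return 0
--         if hi - lo == 1:
--             return term(lo)
--         mid = (lo + hi) // 2
--         return dcsum(lo, mid, term) + dcsum(mid, hi, term)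
--
--     n_conv, n_pool, n_fc = len(mini_in_channel), len(pooling_kernel_size), len(mini_fc_len)
--     conv = lambda i: mini_in_channel[i] * kernel_size[i][0] * kernel_size[i][1]
--     top = (dcsum(0, n_conv, lambda i: 2 * conv(i) + 1)
--            + dcsum(0, n_fc, lambda i: 2 * mini_fc_len[i] + 1))
--     bandwith = (dcsum(0, n_conv, conv)
--                 + dcsum(0, n_pool, lambda i: pooling_kernel_size[i][0] * pooling_kernel_size[i][1] - 1)
--                 + dcsum(0, n_fc, lambda i: mini_fc_len[i]))
--     return top, bandwith
-- ===== Notes on version B (the rewrite author's own statement) =====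
-- stated objective: alternative
-- what changed: Replaces A's six sequential index-accumulation loops with a single generic divide-and-conquer combiner dcsum that recursively halves each index range and adds the two halves' partial sums (correct because integer addition is associative), applied with per-layer term functions.
import Mathlib
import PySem

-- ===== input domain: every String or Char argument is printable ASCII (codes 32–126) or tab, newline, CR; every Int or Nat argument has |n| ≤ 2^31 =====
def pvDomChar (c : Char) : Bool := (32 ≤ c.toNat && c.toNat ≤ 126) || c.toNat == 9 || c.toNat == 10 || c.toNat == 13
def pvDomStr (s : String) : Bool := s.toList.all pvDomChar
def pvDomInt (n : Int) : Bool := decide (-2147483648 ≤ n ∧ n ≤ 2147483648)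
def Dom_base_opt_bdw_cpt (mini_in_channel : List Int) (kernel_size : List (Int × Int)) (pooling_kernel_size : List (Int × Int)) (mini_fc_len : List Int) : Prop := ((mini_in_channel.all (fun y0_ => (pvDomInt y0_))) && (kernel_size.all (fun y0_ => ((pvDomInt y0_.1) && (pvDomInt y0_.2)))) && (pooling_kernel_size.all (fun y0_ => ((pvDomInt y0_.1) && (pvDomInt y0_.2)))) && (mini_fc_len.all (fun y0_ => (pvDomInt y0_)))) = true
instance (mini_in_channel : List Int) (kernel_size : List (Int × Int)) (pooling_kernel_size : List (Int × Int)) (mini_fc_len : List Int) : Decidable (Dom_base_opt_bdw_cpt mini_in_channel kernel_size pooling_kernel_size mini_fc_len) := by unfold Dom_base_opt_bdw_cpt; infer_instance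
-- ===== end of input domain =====

-- B replaces A's six sequential index-accumulation loops by a single generic
-- divide-and-conquer combiner (dcSum) that recursively halves each index range and
-- adds the two halves' partial sums; objective: alternative. Same return value on Pre_.

-- ===== PORT A =====
-- literal transliteration of A: five loops over range(len(...)) with indexing
def base_opt_bdw_cpt (mini_in_channel : List Int) (kernel_size : List (Int × Int)) (pooling_kernel_size : List (Int × Int)) (mini_fc_len : List Int) : Int × Int :=
  let top1 : Int := (PySem.List.pyRange 0 (mini_in_channel.length : Int) 1).foldl
    (fun top i => top + PySem.List.pyGetD mini_in_channel i 0
        * (PySem.List.pyGetD kernel_size i (0, 0)).1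
        * (PySem.List.pyGetD kernel_size i (0, 0)).2 * 2 + 1) 0
  let top : Int := (PySem.List.pyRange 0 (mini_fc_len.length : Int) 1).foldl
    (fun top i => top + PySem.List.pyGetD mini_fc_len i 0 * 2 + 1) top1
  let bw1 : Int := (PySem.List.pyRange 0 (mini_in_channel.length : Int) 1).foldl
    (fun bw i => bw + PySem.List.pyGetD mini_in_channel i 0
        * (PySem.List.pyGetD kernel_size i (0, 0)).1
        * (PySem.List.pyGetD kernel_size i (0, 0)).2) 0
  let bw2 : Int := (PySem.List.pyRange 0 (pooling_kernel_size.length : Int) 1).foldl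
    (fun bw i => bw + (PySem.List.pyGetD pooling_kernel_size i (0, 0)).1
        * (PySem.List.pyGetD pooling_kernel_size i (0, 0)).2 - 1) 0
  let bandwith : Int := (PySem.List.pyRange 0 (mini_fc_len.length : Int) 1).foldl
    (fun bw i => bw + PySem.List.pyGetD mini_fc_len i 0) (bw1 + bw2)
  (top, bandwith)

-- ===== PORT B =====
-- Source B's generic divide-and-conquer reduction over the index range [lo, hi)
def dcSum (term : Nat → Int) (lo hi : Nat) : Int :=
  if _h0 : hi - lo = 0 then 0
  else if _h1 : hi - lo = 1 then term lo
  else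
    dcSum term lo ((lo + hi) / 2) + dcSum term ((lo + hi) / 2) hi
termination_by hi - lo
decreasing_by all_goals omega

-- literal transliteration of Source B: dcsum applied to per-index term functions
def base_opt_bdw_cpt_alt (mini_in_channel : List Int) (kernel_size : List (Int × Int)) (pooling_kernel_size : List (Int × Int)) (mini_fc_len : List Int) : Int × Int :=
  let conv : Nat → Int := fun i => mini_in_channel.getD i 0
      * (kernel_size.getD i (0, 0)).1 * (kernel_size.getD i (0, 0)).2
  let top : Int := dcSum (fun i => 2 * conv i + 1) 0 mini_in_channel.length
      + dcSum (fun i => 2 * mini_fc_len.getD i 0 + 1) 0 mini_fc_len.length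
  let bandwith : Int := dcSum conv 0 mini_in_channel.length
      + dcSum (fun i => (pooling_kernel_size.getD i (0, 0)).1
          * (pooling_kernel_size.getD i (0, 0)).2 - 1) 0 pooling_kernel_size.length
      + dcSum (fun i => mini_fc_len.getD i 0) 0 mini_fc_len.length
  (top, bandwith)

-- ===== PRECONDITION & SPEC =====
-- Pre_ excludes exactly the inputs where A raises IndexError: kernel_size shorter than mini_in_channel.
def Pre_base_opt_bdw_cpt (mini_in_channel : List Int) (kernel_size : List (Int × Int)) (pooling_kernel_size : List (Int × Int)) (mini_fc_len : List Int) : Prop :=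
  mini_in_channel.length ≤ kernel_size.length
instance (mini_in_channel : List Int) (kernel_size : List (Int × Int)) (pooling_kernel_size : List (Int × Int)) (mini_fc_len : List Int) : Decidable (Pre_base_opt_bdw_cpt mini_in_channel kernel_size pooling_kernel_size mini_fc_len) := by unfold Pre_base_opt_bdw_cpt; infer_instance

def pvWitness_base_opt_bdw_cpt : List Int × (List (Int × Int)) × (List (Int × Int)) × List Int :=
  ([1, 2], [(2, 3), (1, 1)], [(2, 2)], [4, 5])

def Spec_base_opt_bdw_cpt (mini_in_channel : List Int) (kernel_size : List (Int × Int)) (pooling_kernel_size : List (Int × Int)) (mini_fc_len : List Int) (out : Int × Int) : Prop := out = base_opt_bdw_cpt_alt mini_in_channel kernel_size pooling_kernel_size mini_fc_len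
instance (mini_in_channel : List Int) (kernel_size : List (Int × Int)) (pooling_kernel_size : List (Int × Int)) (mini_fc_len : List Int) (out : Int × Int) : Decidable (Spec_base_opt_bdw_cpt mini_in_channel kernel_size pooling_kernel_size mini_fc_len out) := by unfold Spec_base_opt_bdw_cpt; infer_instance

-- ===== CLAIM (what is proved, stated in full; the proofs are below) =====
def Claim_equal_base_opt_bdw_cpt : Prop := ∀ (mini_in_channel : List Int) (kernel_size : List (Int × Int)) (pooling_kernel_size : List (Int × Int)) (mini_fc_len : List Int), Dom_base_opt_bdw_cpt mini_in_channel kernel_size pooling_kernel_size mini_fc_len → Pre_base_opt_bdw_cpt mini_in_channel kernel_size pooling_kernel_size mini_fc_len → Spec_base_opt_bdw_cpt mini_in_channel kernel_size pooling_kernel_size mini_fc_len (base_opt_bdw_cpt mini_in_channel kernel_size pooling_kernel_size mini_fc_len)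

-- ===== LEMMAS AND PROOFS =====

-- dcSum computes the sum of term over the index interval [lo, hi)
theorem dcSum_eq_sum_Ico (term : Nat → Int) (lo hi : Nat) :
    dcSum term lo hi = ∑ i ∈ Finset.Ico lo hi, term i := by
  fun_induction dcSum term lo hi with
  | case1 lo hi h0 =>
    have : Finset.Ico lo hi = ∅ := Finset.Ico_eq_empty (by omega)
    simp [this]
  | case2 lo hi h0 h1 =>
    have hhi : hi = lo + 1 := by omega
    subst hhi
    simp
  | case3 lo hi h0 h1 ih1 ih2 =>
    rw [ih1, ih2, Finset.sum_Ico_consecutive]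
    · omega
    · omega

-- dcSum from 0 is the sum over Finset.range
theorem dcSum_eq_sum_range (term : Nat → Int) (n : Nat) :
    dcSum term 0 n = ∑ i ∈ Finset.range n, term i := by
  rw [dcSum_eq_sum_Ico, Finset.range_eq_Ico]

-- A's index loop of shape 'acc + f i' over range(n) equals the Finset.range sum
theorem pv_foldl_pyRange_sum (f : Int → Int) (n : Nat) (init : Int) :
    (PySem.List.pyRange 0 (n : Int) 1).foldl (fun a i => a + f i) init
    = init + ∑ j ∈ Finset.range n, f (j : Int) := by
  rw [PySem.List.foldl_add, PySem.List.pyRange_one]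
  have h : ((n : Int) - 0).toNat = n := by omega
  rw [h, List.map_map]
  have hc : (f ∘ fun k : Nat => (0 : Int) + (k : Int)) = fun j : Nat => f (j : Int) := by
    funext k; simp
  rw [hc]
  congr 1

-- ===== VERDICT =====
theorem base_opt_bdw_cpt_spec : Claim_equal_base_opt_bdw_cpt := by
  intro mic ks pks fc _ _
  unfold Spec_base_opt_bdw_cpt base_opt_bdw_cpt base_opt_bdw_cpt_alt
  -- rewrite A's five loops into range sums
  have hA1 :
      (PySem.List.pyRange 0 (mic.length : Int) 1).foldl
        (fun top i => top + PySem.List.pyGetD mic i 0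
          * (PySem.List.pyGetD ks i (0, 0)).1 * (PySem.List.pyGetD ks i (0, 0)).2 * 2 + 1) (0 : Int)
      = ∑ j ∈ Finset.range mic.length, (PySem.List.pyGetD mic (j : Int) 0
          * (PySem.List.pyGetD ks (j : Int) (0, 0)).1 * (PySem.List.pyGetD ks (j : Int) (0, 0)).2 * 2 + 1) := by
    rw [PySem.List.foldl_congr_mem _ _
      (fun top i => top + (PySem.List.pyGetD mic i 0
        * (PySem.List.pyGetD ks i (0, 0)).1 * (PySem.List.pyGetD ks i (0, 0)).2 * 2 + 1))
      _ (fun acc x _ => by ring)]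
    rw [pv_foldl_pyRange_sum]; ring
  have hA2 : ∀ (a : Int),
      (PySem.List.pyRange 0 (fc.length : Int) 1).foldl
        (fun top i => top + PySem.List.pyGetD fc i 0 * 2 + 1) a
      = a + ∑ j ∈ Finset.range fc.length, (PySem.List.pyGetD fc (j : Int) 0 * 2 + 1) := by
    intro a
    rw [PySem.List.foldl_congr_mem _ _
      (fun top i => top + (PySem.List.pyGetD fc i 0 * 2 + 1))
      _ (fun acc x _ => by ring)]
    rw [pv_foldl_pyRange_sum]
  have hA3 :
      (PySem.List.pyRange 0 (mic.length : Int) 1).foldl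
        (fun bw i => bw + PySem.List.pyGetD mic i 0
          * (PySem.List.pyGetD ks i (0, 0)).1 * (PySem.List.pyGetD ks i (0, 0)).2) (0 : Int)
      = ∑ j ∈ Finset.range mic.length, (PySem.List.pyGetD mic (j : Int) 0
          * (PySem.List.pyGetD ks (j : Int) (0, 0)).1 * (PySem.List.pyGetD ks (j : Int) (0, 0)).2) := by
    rw [pv_foldl_pyRange_sum]; ring
  have hA4 :
      (PySem.List.pyRange 0 (pks.length : Int) 1).foldl
        (fun bw i => bw + (PySem.List.pyGetD pks i (0, 0)).1
          * (PySem.List.pyGetD pks i (0, 0)).2 - 1) (0 : Int)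
      = ∑ j ∈ Finset.range pks.length, ((PySem.List.pyGetD pks (j : Int) (0, 0)).1
          * (PySem.List.pyGetD pks (j : Int) (0, 0)).2 - 1) := by
    rw [PySem.List.foldl_congr_mem _ _
      (fun bw i => bw + ((PySem.List.pyGetD pks i (0, 0)).1
        * (PySem.List.pyGetD pks i (0, 0)).2 - 1))
      _ (fun acc x _ => by ring)]
    rw [pv_foldl_pyRange_sum]; ring
  have hA5 : ∀ (a : Int),
      (PySem.List.pyRange 0 (fc.length : Int) 1).foldl
        (fun bw i => bw + PySem.List.pyGetD fc i 0) a
      = a + ∑ j ∈ Finset.range fc.length, PySem.List.pyGetD fc (j : Int) 0 := by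
    intro a
    rw [pv_foldl_pyRange_sum]
  simp only [hA1, hA2, hA3, hA4, hA5, dcSum_eq_sum_range]
  -- match the summands termwise (pyGetD at a Nat-cast index is getD)
  refine Prod.ext ?_ ?_
  · simp only []
    have e1 : ∀ j ∈ Finset.range mic.length,
        (PySem.List.pyGetD mic (j : Int) 0
          * (PySem.List.pyGetD ks (j : Int) (0, 0)).1 * (PySem.List.pyGetD ks (j : Int) (0, 0)).2 * 2 + 1)
        = (2 * (mic.getD j 0 * (ks.getD j (0, 0)).1 * (ks.getD j (0, 0)).2) + 1) := by
      intro j _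
      rw [PySem.List.pyGetD_natCast, PySem.List.pyGetD_natCast]; ring
    have e2 : ∀ j ∈ Finset.range fc.length,
        (PySem.List.pyGetD fc (j : Int) 0 * 2 + 1) = (2 * fc.getD j 0 + 1) := by
      intro j _
      rw [PySem.List.pyGetD_natCast]; ring
    rw [Finset.sum_congr rfl e1, Finset.sum_congr rfl e2]
  · simp only []
    have e3 : ∀ j ∈ Finset.range mic.length,
        (PySem.List.pyGetD mic (j : Int) 0
          * (PySem.List.pyGetD ks (j : Int) (0, 0)).1 * (PySem.List.pyGetD ks (j : Int) (0, 0)).2)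
        = (mic.getD j 0 * (ks.getD j (0, 0)).1 * (ks.getD j (0, 0)).2) := by
      intro j _
      rw [PySem.List.pyGetD_natCast, PySem.List.pyGetD_natCast]
    have e4 : ∀ j ∈ Finset.range pks.length,
        ((PySem.List.pyGetD pks (j : Int) (0, 0)).1 * (PySem.List.pyGetD pks (j : Int) (0, 0)).2 - 1)
        = ((pks.getD j (0, 0)).1 * (pks.getD j (0, 0)).2 - 1) := by
      intro j _
      rw [PySem.List.pyGetD_natCast]
    have e5 : ∀ j ∈ Finset.range fc.length,
        PySem.List.pyGetD fc (j : Int) 0 = fc.getD j 0 := by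
      intro j _
      rw [PySem.List.pyGetD_natCast]
    rw [Finset.sum_congr rfl e3, Finset.sum_congr rfl e4, Finset.sum_congr rfl e5]
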